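-- pv_equiv track=rewrite | github.com/pjaehyun/TIL | PS/programmers/PCCP 모의고사 2회 3번.py | solution
-- ===== SOURCE A (Python) =====
-- from collections import deque
--
-- def solution(menu, order, k):
--     n = len(order)
--     dq = deque()
--     answer = 0
--     time = 0
--     idx = 0
--
--     while idx < n:
--         if not dq:
--             if (idx * k) > time:
--                 time = idx * k + menu[order[idx]]
--             else: time += menu[order[idx]]
--             idx += 1
--         else:
--             time += menu[dq.popleft()]
--         while idx < n and time > (idx*k):
--             dq.append(order[idx])
--             idx += 1
--         answer = max(answer, len(dq))
--     return answer + 1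
-- ===== SOURCE B (Python) =====
-- def solution(menu, order, k):
--     # No deque: keep only the last finish time f and an arrival pointer a;
--     # the per-customer admission scan is replaced by a closed-form
--     # ceiling-division jump of the pointer.
--     n = len(order)
--     best = 1
--     f = 0
--     a = 0
--     for i in range(n):
--         if a <= i:          # customer i starts fresh (queue would be empty)
--             a = i + 1
--             if i * k > f:
--                 f = i * k
--         f += menu[order[i]]
--         if k > 0:
--             t = -(-f // k)  # ceil(f / k): first arrival index not yet waiting
--             if t > a:
--                 a = t if t < n else n
--         else:
--             if a < n and f > a * k:
--                 a = n
--         if a - i > best: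
--             best = a - i
--     return best
-- ===== Notes on version B (the rewrite author's own statement) =====
-- stated objective: alternative
-- what changed: B drops A's deque and its per-customer admission while-scan: it keeps only the last finish time and an arrival pointer, and jumps the pointer in O(1) by a closed-form ceiling division ceil(f/k) (resp. a single sign test for k<=0) instead of scanning arrivals one by one, tracking the maximal backlog directly (= A's answer+1).
-- outside the precondition, e.g. on solution([3, 7, 0, 7, -1, 1], [5, 0, 47, -1, 0, 2], -1): A returns 6, B raises IndexError
import Mathlib
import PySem

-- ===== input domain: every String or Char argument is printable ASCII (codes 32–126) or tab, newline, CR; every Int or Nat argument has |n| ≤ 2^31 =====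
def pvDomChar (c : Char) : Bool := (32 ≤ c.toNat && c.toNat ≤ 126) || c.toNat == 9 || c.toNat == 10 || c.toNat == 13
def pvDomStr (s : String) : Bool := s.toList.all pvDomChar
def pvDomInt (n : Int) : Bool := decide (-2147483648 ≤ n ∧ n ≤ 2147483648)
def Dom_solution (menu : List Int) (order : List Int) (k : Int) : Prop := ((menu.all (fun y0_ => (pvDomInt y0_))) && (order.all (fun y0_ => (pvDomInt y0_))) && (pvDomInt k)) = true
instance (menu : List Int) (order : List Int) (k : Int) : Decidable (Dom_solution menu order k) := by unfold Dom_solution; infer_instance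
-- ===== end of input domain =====

-- B drops A's deque simulation and its per-customer admission scan: it keeps only the last
-- finish time and an arrival pointer, jumping the pointer by a closed-form ceiling division
-- (a single sign test for k ≤ 0) and tracking the maximal backlog directly (alternative).

-- ===== PORT A =====
-- inner `while idx < n and time > idx*k: dq.append(order[idx]); idx += 1`
-- (fuel ≥ n - idx makes the loop total; idx is always a valid index into order, so getD is exact)
def fillA (order : List Int) (k : Int) (n : Nat) (time : Int) :
    Nat → Nat → List Int → Nat × List Int
  | 0, idx, dq => (idx, dq)
  | fuel + 1, idx, dq =>
    if idx < n ∧ time > (idx : Int) * k then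
      fillA order k n time fuel (idx + 1) (dq ++ [order.getD idx 0])
    else (idx, dq)

-- Python A's outer `while idx < n` loop; state (idx, dq, answer, time); each iteration
-- strictly decreases 2*(n-idx)+len(dq), so fuel 2*n+1 is enough; menu[·] via PySem.List.pyGetD
def loopA (menu order : List Int) (k : Int) (n : Nat) :
    Nat → Nat → List Int → Int → Int → Int
  | 0, _, _, answer, _ => answer
  | fuel + 1, idx, dq, answer, time =>
    if idx < n then
      if dq = [] then
        let m := PySem.List.pyGetD menu (order.getD idx 0) 0
        let time' := if (idx : Int) * k > time then (idx : Int) * k + m else time + m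
        let r := fillA order k n time' (n - (idx + 1)) (idx + 1) []
        loopA menu order k n fuel r.1 r.2 (max answer (r.2.length : Int)) time'
      else
        let time' := time + PySem.List.pyGetD menu (dq.headD 0) 0
        let r := fillA order k n time' (n - idx) idx dq.tail
        loopA menu order k n fuel r.1 r.2 (max answer (r.2.length : Int)) time'
    else answer

def solution (menu : List Int) (order : List Int) (k : Int) : Int :=
  loopA menu order k order.length (2 * order.length + 1) 0 [] 0 0 + 1

-- ===== PORT B =====
-- B's pointer jump: `if k > 0: t = -(-f // k); if t > a: a = t if t < n else n
--                    else: if a < n and f > a*k: a = n`  (all state is Python int → Int)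
def nextA (k n f a : Int) : Int :=
  if k > 0 then
    if -(PySem.Int.floordiv (-f) k) > a
    then (if -(PySem.Int.floordiv (-f) k) < n then -(PySem.Int.floordiv (-f) k) else n)
    else a
  else if a < n ∧ f > a * k then n else a

-- one iteration of B's for-loop; state (best, f, a)
def stepB (menu order : List Int) (k n : Int) (st : Int × Int × Int) (i : Nat) :
    Int × Int × Int :=
  let a1 : Int := if st.2.2 ≤ (i : Int) then (i : Int) + 1 else st.2.2
  let f1 : Int := if st.2.2 ≤ (i : Int) ∧ (i : Int) * k > st.2.1 then (i : Int) * k else st.2.1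
  let f2 : Int := f1 + PySem.List.pyGetD menu (order.getD i 0) 0
  let a2 : Int := nextA k n f2 a1
  ((if a2 - (i : Int) > st.1 then a2 - (i : Int) else st.1), f2, a2)

def solution_alt (menu : List Int) (order : List Int) (k : Int) : Int :=
  let n := order.length
  ((List.range n).foldl (stepB menu order k (n : Int)) (1, 0, 0)).1

-- ===== PRECONDITION & SPEC =====
-- Pre_ excludes inputs with an order entry that is not a valid (possibly negative) Python index
-- into menu: on those Python A raises IndexError, except that A happens to return when every such
-- entry is still queued unserved at loop exit, while B (which prices every order) raises there too.
def Pre_solution (menu : List Int) (order : List Int) (k : Int) : Prop :=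
  ∀ o ∈ order, -(menu.length : Int) ≤ o ∧ o < (menu.length : Int)
instance (menu : List Int) (order : List Int) (k : Int) : Decidable (Pre_solution menu order k) := by
  unfold Pre_solution; infer_instance

def pvWitness_solution : List Int × List Int × Int := ([3, 5, 2], [0, 2, 2, 1], 2)

def Spec_solution (menu : List Int) (order : List Int) (k : Int) (out : Int) : Prop :=
  out = solution_alt menu order k
instance (menu : List Int) (order : List Int) (k : Int) (out : Int) :
    Decidable (Spec_solution menu order k out) := by unfold Spec_solution; infer_instance

-- ===== CLAIM (what is proved, stated in full; the proofs are below) =====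
def Claim_equal_solution : Prop := ∀ (menu : List Int) (order : List Int) (k : Int), Dom_solution menu order k → Pre_solution menu order k → Spec_solution menu order k (solution menu order k)

-- ===== LEMMAS AND PROOFS =====

-- the queue contents of A when the first s customers are served and idx are taken
def dqOf (order : List Int) (s idx : Nat) : List Int :=
  (List.range' s (idx - s)).map (fun j => order.getD j 0)

theorem dqOf_self (order : List Int) (s : Nat) : dqOf order s s = [] := by
  simp [dqOf]

theorem dqOf_length (order : List Int) (s idx : Nat) :
    (dqOf order s idx).length = idx - s := by
  simp [dqOf]

theorem dqOf_cons (order : List Int) (s idx : Nat) (h : s < idx) :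
    dqOf order s idx = order.getD s 0 :: dqOf order (s + 1) idx := by
  unfold dqOf
  have h1 : idx - s = (idx - (s + 1)) + 1 := by omega
  rw [h1, List.range'_succ]
  rfl

theorem dqOf_append (order : List Int) (s idx a : Nat) (h1 : s ≤ idx) (h2 : idx ≤ a) :
    dqOf order s idx ++ dqOf order idx a = dqOf order s a := by
  unfold dqOf
  rw [← List.map_append]
  have h3 : s + 1 * (idx - s) = idx := by omega
  have h4 : (idx - s) + (a - idx) = a - s := by omega
  rw [← h4, ← List.range'_append (s := s) (m := idx - s) (n := a - idx) (step := 1), h3]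

-- A's inner-while pointer, used only on the proof side to describe A's loop
def arriveBGo (k : Int) (n : Nat) (f : Int) : Nat → Nat → Nat
  | 0, a => a
  | fuel + 1, a => if a < n ∧ f > (a : Int) * k then arriveBGo k n f fuel (a + 1) else a

def arriveB (k : Int) (n : Nat) (f : Int) (a : Nat) : Nat :=
  arriveBGo k n f (n - a) a

-- arriveBGo returns its pointer unchanged when the loop guard fails
theorem arriveBGo_stop (k : Int) (n : Nat) (f : Int) (fuel a : Nat)
    (h : ¬ (a < n ∧ f > (a : Int) * k)) : arriveBGo k n f fuel a = a := by
  cases fuel with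
  | zero => rfl
  | succ fuel => rw [arriveBGo, if_neg h]

theorem arriveB_unfold (k : Int) (n : Nat) (f : Int) (a : Nat) :
    arriveB k n f a = if a < n ∧ f > (a : Int) * k then arriveB k n f (a + 1) else a := by
  unfold arriveB
  split
  · next h =>
    have h1 : n - a = (n - (a + 1)) + 1 := by omega
    rw [h1, arriveBGo, if_pos h]
  · next h => exact arriveBGo_stop k n f (n - a) a h

theorem arriveBGo_ge (k : Int) (n : Nat) (f : Int) :
    ∀ (fuel a : Nat), a ≤ arriveBGo k n f fuel a := by
  intro fuel
  induction fuel with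
  | zero => intro a; exact le_refl a
  | succ fuel ih =>
    intro a
    rw [arriveBGo]
    split
    · exact le_trans (by omega) (ih (a + 1))
    · exact le_refl a

theorem arriveB_ge (k : Int) (n : Nat) (f : Int) (a : Nat) : a ≤ arriveB k n f a :=
  arriveBGo_ge k n f (n - a) a

theorem arriveBGo_le (k : Int) (n : Nat) (f : Int) :
    ∀ (fuel a : Nat), a ≤ n → arriveBGo k n f fuel a ≤ n := by
  intro fuel
  induction fuel with
  | zero => intro a h; exact h
  | succ fuel ih =>
    intro a h
    rw [arriveBGo]
    split
    · next hc => exact ih (a + 1) (by omega)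
    · exact h

theorem arriveB_le (k : Int) (n : Nat) (f : Int) (a : Nat) (h : a ≤ n) :
    arriveB k n f a ≤ n :=
  arriveBGo_le k n f (n - a) a h

-- A's queue-filling loop computes the pointer arriveB and appends exactly the taken customers
theorem fillA_eq (order : List Int) (k : Int) (n : Nat) (time : Int) :
    ∀ (fuel idx : Nat) (dq : List Int), n ≤ idx + fuel →
      fillA order k n time fuel idx dq
        = (arriveB k n time idx, dq ++ dqOf order idx (arriveB k n time idx)) := by
  intro fuel
  induction fuel with
  | zero =>
    intro idx dq hfuel
    have hc : ¬ (idx < n ∧ time > (idx : Int) * k) := by omega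
    rw [fillA, arriveB, arriveBGo_stop k n time (n - idx) idx hc]
    simp [dqOf_self]
  | succ fuel ih =>
    intro idx dq hfuel
    rw [fillA]
    conv_rhs => rw [arriveB_unfold]
    split
    · next h =>
      rw [ih (idx + 1) (dq ++ [order.getD idx 0]) (by omega)]
      have hge : idx + 1 ≤ arriveB k n time (idx + 1) := arriveB_ge k n time (idx + 1)
      rw [dqOf_cons order idx (arriveB k n time (idx + 1)) (by omega)]
      simp
    · simp [dqOf_self]

-- the ceiling-division branch: m*k < f ↔ m < ceil(f/k), for k > 0
theorem lt_ceil_iff (k f m : Int) (hk : 0 < k) :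
    m * k < f ↔ m < -(PySem.Int.floordiv (-f) k) := by
  rw [lt_neg, PySem.Int.floordiv_lt_iff_lt_mul hk]
  constructor <;> intro h <;> nlinarith

-- with k ≤ 0 the guard, once true, stays true, so the pointer runs to n
theorem arriveBGo_neg (k : Int) (n : Nat) (f : Int) (hk : k ≤ 0) :
    ∀ (fuel a : Nat), n ≤ a + fuel → a < n → f > (a : Int) * k →
      arriveBGo k n f fuel a = n := by
  intro fuel
  induction fuel with
  | zero => intro a h1 h2 _; omega
  | succ fuel ih =>
    intro a h1 h2 h3
    rw [arriveBGo, if_pos ⟨h2, h3⟩]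
    by_cases h4 : a + 1 < n
    · have h5 : ((a : Int) + 1) * k ≤ (a : Int) * k := by nlinarith
      refine ih (a + 1) (by omega) h4 ?_
      push_cast
      omega
    · have h6 : a + 1 = n := by omega
      rw [arriveBGo_stop k n f fuel (a + 1) (by omega), h6]

-- for k > 0 the pointer lands at min(ceil(f/k), n) once it moves
theorem arriveBGo_pos (k : Int) (n : Nat) (f : Int) (hk : 0 < k) :
    ∀ (fuel a : Nat), n ≤ a + fuel → a ≤ n →
      ((arriveBGo k n f fuel a : Nat) : Int)
        = if (a : Int) < -(PySem.Int.floordiv (-f) k)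
          then min (-(PySem.Int.floordiv (-f) k)) (n : Int) else (a : Int) := by
  intro fuel
  induction fuel with
  | zero =>
    intro a h1 h2
    have h3 : a = n := by omega
    subst h3
    simp only [arriveBGo]
    split <;> omega
  | succ fuel ih =>
    intro a h1 h2
    rw [arriveBGo]
    set t : Int := -(PySem.Int.floordiv (-f) k) with ht
    have hc : f > (a : Int) * k ↔ (a : Int) < t := by
      rw [ht]; exact Iff.symm (Iff.symm (lt_ceil_iff k f a hk))
    split
    · next h =>
      have hat : (a : Int) < t := hc.mp h.2
      rw [ih (a + 1) (by omega) (by omega)]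
      have han : a < n := h.1
      push_cast
      split <;> [skip; skip] <;> omega
    · next h =>
      rw [not_and_or] at h
      rcases h with h | h
      · have h3 : a = n := by omega
        subst h3
        split <;> omega
      · have hat : ¬ ((a : Int) < t) := fun hh => h (hc.mpr hh)
        rw [if_neg hat]

-- B's closed-form jump equals A's inner-while pointer
theorem nextA_eq (k : Int) (n : Nat) (f : Int) (a : Nat) (ha : a ≤ n) :
    nextA k (n : Int) f (a : Int) = ((arriveB k n f a : Nat) : Int) := by
  unfold nextA arriveB
  split
  · next hk =>
    rw [arriveBGo_pos k n f hk (n - a) a (by omega) ha]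
    set t : Int := -(PySem.Int.floordiv (-f) k) with ht
    split_ifs <;> omega
  · next hk =>
    push_neg at hk
    by_cases hc : a < n ∧ f > (a : Int) * k
    · rw [arriveBGo_neg k n f hk (n - a) a (by omega) hc.1 hc.2]
      have : (a : Int) < (n : Int) := by exact_mod_cast hc.1
      rw [if_pos ⟨this, hc.2⟩]
    · rw [arriveBGo_stop k n f (n - a) a hc]
      have : ¬ ((a : Int) < (n : Int) ∧ f > (a : Int) * k) := by
        intro hh
        exact hc ⟨by exact_mod_cast hh.1, hh.2⟩
      rw [if_neg this]

-- once the pointer sits at n it stays at n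
theorem nextA_self (k : Int) (n f : Int) : nextA k n f n = n := by
  unfold nextA
  split_ifs <;> omega

-- stepB when the pointer has not passed i (A's empty-queue branch)
theorem stepB_serve (menu order : List Int) (k n best f a : Int) (i : Nat)
    (h : a ≤ (i : Int)) (F A2 : Int)
    (hF : F = (if (i : Int) * k > f then (i : Int) * k else f)
                + PySem.List.pyGetD menu (order.getD i 0) 0)
    (hA2 : A2 = nextA k n F ((i : Int) + 1)) :
    stepB menu order k n (best, f, a) i =
      ((if A2 - (i : Int) > best then A2 - (i : Int) else best), F, A2) := by
  subst hF; subst hA2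
  simp only [stepB, h, true_and, if_true]

-- stepB when customer i is already waiting (A's pop branch)
theorem stepB_pop (menu order : List Int) (k n best f a : Int) (i : Nat)
    (h : ¬ a ≤ (i : Int)) (F A2 : Int)
    (hF : F = f + PySem.List.pyGetD menu (order.getD i 0) 0)
    (hA2 : A2 = nextA k n F a) :
    stepB menu order k n (best, f, a) i =
      ((if A2 - (i : Int) > best then A2 - (i : Int) else best), F, A2) := by
  subst hF; subst hA2
  simp only [stepB, h, false_and, if_false]

-- once all n customers are taken (a = n) the remaining iterations of B cannot raise best
theorem tailB (menu order : List Int) (k : Int) (n : Nat) :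
    ∀ (m j : Nat) (f best : Int), j + m ≤ n → (n : Int) - (j : Int) ≤ best →
      ((List.range' j m).foldl (stepB menu order k (n : Int)) (best, f, (n : Int))).1 = best := by
  intro m
  induction m with
  | zero => intro j f best _ _; rfl
  | succ m ih =>
    intro j f best hle hbest
    rw [List.range'_succ, List.foldl_cons]
    have hj : ¬ ((n : Int) ≤ (j : Int)) := by
      push_cast
      omega
    rw [stepB_pop menu order k (n : Int) best f (n : Int) j hj
          (f + PySem.List.pyGetD menu (order.getD j 0) 0) (n : Int) rfl
          (nextA_self k (n : Int) (f + PySem.List.pyGetD menu (order.getD j 0) 0)).symm]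
    have hnb : ¬ ((n : Int) - (j : Int) > best) := by omega
    simp only [hnb, if_false]
    exact ih (j + 1) _ best (by omega) (by push_cast; omega)

-- the main simulation lemma: A's loop state corresponds to B's fold state
theorem mainL (menu order : List Int) (k : Int) (n : Nat) :
    ∀ (fuel s idx : Nat) (answer time : Int), n ≤ s + fuel → s ≤ idx → idx ≤ n →
      (idx : Int) - (s : Int) ≤ answer →
      ∀ (fuelA : Nat), 2 * (n - idx) + (idx - s) + 1 ≤ fuelA →
      loopA menu order k n fuelA idx (dqOf order s idx) answer time + 1
        = ((List.range' s (n - s)).foldl (stepB menu order k (n : Int))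
            (answer + 1, time, (idx : Int))).1 := by
  intro fuel
  induction fuel with
  | zero =>
    intro s idx answer time hfuel hsi hin hans fuelA hfA
    have hs : s = n := by omega
    have hi : idx = n := by omega
    subst hs; subst hi
    cases fuelA with
    | zero => omega
    | succ fuelA => rw [loopA]; simp
  | succ fuel ih =>
    intro s idx answer time hfuel hsi hin hans fuelA hfA
    cases fuelA with
    | zero => omega
    | succ fuelA => ?_
    by_cases hsn : n ≤ s
    · have hs : s = n := by omega
      have hi : idx = n := by omega
      subst hs; subst hi
      rw [loopA]; simp
    · push_neg at hsn
      by_cases hix : idx = n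
      · subst hix
        rw [loopA]
        simp only [lt_irrefl, if_false]
        rw [tailB menu order k idx (idx - s) s time (answer + 1) (by omega) (by omega)]
      · have hlt : idx < n := by omega
        by_cases hes : idx = s
        · -- queue empty: serve customer s directly
          subst hes
          rw [loopA, if_pos hlt, if_pos (dqOf_self order idx)]
          simp only [letFun]
          set g := PySem.List.pyGetD menu (order.getD idx 0) 0 with hg
          set T := (if (idx : Int) * k > time then (idx : Int) * k + g else time + g) with hT
          set a2 := arriveB k n T (idx + 1) with ha2
          have h1 : idx + 1 ≤ a2 := arriveB_ge k n T (idx + 1)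
          have h2 : a2 ≤ n := arriveB_le k n T (idx + 1) (by omega)
          have hfill : fillA order k n T (n - (idx + 1)) (idx + 1) []
              = (a2, dqOf order (idx + 1) a2) := by
            rw [fillA_eq order k n T (n - (idx + 1)) (idx + 1) [] (by omega), ← ha2]
            simp
          rw [hfill]
          have hnn : n - idx = (n - (idx + 1)) + 1 := by omega
          rw [hnn, List.range'_succ, List.foldl_cons]
          have hTB : T = (if (idx : Int) * k > time then (idx : Int) * k else time)
              + PySem.List.pyGetD menu (order.getD idx 0) 0 := by
            rw [hT, hg]; split_ifs <;> rfl
          have hA2 : ((a2 : Nat) : Int) = nextA k (n : Int) T ((idx : Int) + 1) := by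
            rw [ha2, ← nextA_eq k n T (idx + 1) (by omega)]
            norm_cast
          rw [stepB_serve menu order k (n : Int) (answer + 1) time (idx : Int) idx
                (le_refl _) T ((a2 : Nat) : Int) hTB hA2]
          rw [ih (idx + 1) a2 (max answer ((dqOf order (idx + 1) a2).length : Int)) T
              (by omega) h1 h2
              (by rw [dqOf_length, Nat.cast_sub h1]; push_cast; exact le_max_right _ _)
              fuelA (by omega)]
          have hinit : max answer ((dqOf order (idx + 1) a2).length : Int) + 1
              = (if ((a2 : Nat) : Int) - (idx : Int) > answer + 1 then ((a2 : Nat) : Int) - (idx : Int)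
                 else answer + 1) := by
            rw [dqOf_length, Nat.cast_sub h1, max_def]
            split_ifs <;> push_cast <;> omega
          rw [hinit]
        · -- queue nonempty: pop customer s
          have hsi' : s < idx := by omega
          rw [loopA]
          have hne : dqOf order s idx ≠ [] := by
            intro h0
            have := dqOf_length order s idx
            rw [h0] at this
            simp at this
            omega
          rw [if_pos hlt, if_neg hne]
          simp only [letFun]
          have hhead : (dqOf order s idx).headD 0 = order.getD s 0 := by
            rw [dqOf_cons order s idx hsi']
            rfl
          have htail : (dqOf order s idx).tail = dqOf order (s + 1) idx := by
            rw [dqOf_cons order s idx hsi']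
            rfl
          rw [hhead, htail]
          set g := PySem.List.pyGetD menu (order.getD s 0) 0 with hg
          set T := time + g with hT
          set a2 := arriveB k n T idx with ha2
          have h1 : idx ≤ a2 := arriveB_ge k n T idx
          have h2 : a2 ≤ n := arriveB_le k n T idx (by omega)
          have h3 : s + 1 ≤ a2 := by omega
          have hfill : fillA order k n T (n - idx) idx (dqOf order (s + 1) idx)
              = (a2, dqOf order (s + 1) a2) := by
            rw [fillA_eq order k n T (n - idx) idx _ (by omega), ← ha2,
                dqOf_append order (s + 1) idx a2 (by omega) h1]
          rw [hfill]
          have hnn : n - s = (n - (s + 1)) + 1 := by omega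
          rw [hnn, List.range'_succ, List.foldl_cons]
          have hcond : ¬ ((idx : Int) ≤ (s : Int)) := by push_cast; omega
          have hA2 : ((a2 : Nat) : Int) = nextA k (n : Int) T (idx : Int) := by
            rw [ha2, ← nextA_eq k n T idx (by omega)]
          rw [stepB_pop menu order k (n : Int) (answer + 1) time (idx : Int) s hcond
                T ((a2 : Nat) : Int) (by rw [hT, hg]) hA2]
          rw [ih (s + 1) a2 (max answer ((dqOf order (s + 1) a2).length : Int)) T
              (by omega) h3 h2
              (by rw [dqOf_length, Nat.cast_sub h3]; push_cast; exact le_max_right _ _)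
              fuelA (by omega)]
          have hinit : max answer ((dqOf order (s + 1) a2).length : Int) + 1
              = (if ((a2 : Nat) : Int) - (s : Int) > answer + 1 then ((a2 : Nat) : Int) - (s : Int)
                 else answer + 1) := by
            rw [dqOf_length, Nat.cast_sub h3, max_def]
            split_ifs <;> push_cast <;> omega
          rw [hinit]

-- ===== VERDICT (by name: the statement is the Claim_ definition above) =====
theorem solution_spec : Claim_equal_solution := by
  intro menu order k _hdom _hpre
  unfold Spec_solution solution solution_alt
  have h0 : ([] : List Int) = dqOf order 0 0 := by simp [dqOf]
  rw [h0, mainL menu order k order.length order.length 0 0 0 0 (by omega) (by omega) (by omega)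
      (by omega) (2 * order.length + 1) (by omega)]
  simp [List.range_eq_range']
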